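-- pv_equiv track=rewrite | github.com/djaychela/playground | codefights/challenge/taking_attendance.py | takingAttendance
-- ===== SOURCE A (Python) =====
-- def takingAttendance(c):
--     t = 0
--     for name in c:
--         t += 5
--         s = 0
--         for l in name.lower():
--             if l not in 'aeiouy':
--                 if s == 0:
--                     s = 1
--                 else:
--                     s *= 2
--             else:
--                 t += s
--                 s = 0
--         t += s
--     return t
-- ===== SOURCE B (Python) =====
-- def takingAttendance(c):
--     total = 5 * len(c)
--     for name in c:
--         chars = name.lower()
--         n = len(chars)
--         pos = 0
--         while pos < n:
--             if chars[pos] in 'aeiouy':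
--                 pos += 1
--             else:
--                 end = pos + 1
--                 while end < n and chars[end] not in 'aeiouy':
--                     end += 1
--                 total += 2 ** (end - pos - 1)
--                 pos = end
--     return total
-- ===== Notes on version B (the rewrite author's own statement) =====
-- stated objective: alternative
-- what changed: B scans each lowercased name run by run, adding the closed-form 2**(k-1) for each maximal non-vowel run of length k, instead of A's per-character doubling state machine with vowel-triggered flushes.
import Mathlib
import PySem

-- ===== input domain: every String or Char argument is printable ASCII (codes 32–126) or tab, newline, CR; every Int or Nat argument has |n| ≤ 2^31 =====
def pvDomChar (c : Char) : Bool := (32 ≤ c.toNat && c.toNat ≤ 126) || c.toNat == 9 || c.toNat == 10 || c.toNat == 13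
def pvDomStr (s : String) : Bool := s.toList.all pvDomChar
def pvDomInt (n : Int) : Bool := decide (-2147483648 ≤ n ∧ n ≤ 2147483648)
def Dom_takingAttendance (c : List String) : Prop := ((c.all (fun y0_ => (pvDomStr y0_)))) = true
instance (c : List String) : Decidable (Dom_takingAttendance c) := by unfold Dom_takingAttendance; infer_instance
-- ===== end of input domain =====

-- B replaces A's per-character doubling state machine by a run-by-run scan adding the
-- closed-form 2^(k-1) per maximal non-vowel run of length k (objective: alternative).

-- ===== PORT A =====
-- `l in 'aeiouy'`
def pvIsVowel (l : Char) : Bool := ['a', 'e', 'i', 'o', 'u', 'y'].contains l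

-- per-character step of A's inner loop, state (t, s)
def pvStepA (p : Int × Int) (l : Char) : Int × Int :=
  if !(pvIsVowel l) then
    (p.1, if p.2 = 0 then (1 : Int) else p.2 * 2)
  else
    (p.1 + p.2, 0)

def takingAttendance (c : List String) : Int :=
  c.foldl (fun t name =>
    let t := t + 5
    let p := (PySem.Str.lower name).toList.foldl pvStepA (t, 0)
    p.1 + p.2) 0

-- ===== PORT B =====
-- Source B's while loop over positions pos..n, transcribed as recursion on the suffix
-- chars[pos:]: skip a vowel, or consume a whole maximal non-vowel run and add 2^(k-1).
def pvScore : List Char → Int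
  | [] => 0
  | ch :: rest =>
    if pvIsVowel ch then pvScore rest
    else
      let run := (ch :: rest).takeWhile (fun x => !pvIsVowel x)
      (2 : Int) ^ (run.length - 1) + pvScore (rest.dropWhile (fun x => !pvIsVowel x))
termination_by cs => cs.length
decreasing_by
  · simp only [List.length_cons, Nat.lt_succ_iff]
    exact Nat.le_refl _
  · simp only [List.length_cons, Nat.lt_succ_iff]
    exact List.length_dropWhile_le _ rest

def takingAttendance_alt (c : List String) : Int :=
  5 * (c.length : Int) + c.foldl (fun tot name => tot + pvScore (PySem.Str.lower name).toList) 0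

-- ===== PRECONDITION & SPEC =====
def Spec_takingAttendance (c : List String) (out : Int) : Prop := out = takingAttendance_alt c
instance (c : List String) (out : Int) : Decidable (Spec_takingAttendance c out) := by unfold Spec_takingAttendance; infer_instance

-- ===== CLAIM (what is proved, stated in full; the proofs are below) =====
def Claim_equal_takingAttendance : Prop := ∀ (c : List String), Dom_takingAttendance c → Spec_takingAttendance c (takingAttendance c)

-- ===== LEMMAS AND PROOFS =====

-- unfolding equations for pvScore (well-founded recursion)
theorem pvScore_nil : pvScore [] = 0 := by rw [pvScore]

theorem pvScore_vowel (ch : Char) (rest : List Char) (hv : pvIsVowel ch = true) :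
    pvScore (ch :: rest) = pvScore rest := by
  rw [pvScore]
  simp [hv]

theorem pvScore_consonant (ch : Char) (rest : List Char) (hv : pvIsVowel ch = false) :
    pvScore (ch :: rest)
      = 2 ^ (List.takeWhile (fun x => !pvIsVowel x) rest).length
        + pvScore (List.dropWhile (fun x => !pvIsVowel x) rest) := by
  rw [pvScore]
  simp [hv]

-- A's inner loop, flushed at the end, equals t plus: pvScore when no run is pending,
-- otherwise s doubled through the leading non-vowel run plus pvScore of the remainder.
theorem pvInner (cs : List Char) : ∀ t s : Int,
    (cs.foldl pvStepA (t, s)).1 + (cs.foldl pvStepA (t, s)).2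
      = t + (if s = 0 then pvScore cs
             else s * 2 ^ (cs.takeWhile (fun x => !pvIsVowel x)).length
                  + pvScore (cs.dropWhile (fun x => !pvIsVowel x))) := by
  induction cs with
  | nil =>
    intro t s
    by_cases h : s = 0 <;> simp [pvScore_nil, h]
  | cons ch rest ih =>
    intro t s
    by_cases hv : pvIsVowel ch = true
    · by_cases h : s = 0
      · simp [List.foldl_cons, pvStepA, hv, h, ih, pvScore_vowel ch _ hv]
      · simp [List.foldl_cons, pvStepA, hv, h, ih, pvScore_vowel ch _ hv]
        ring
    · simp only [Bool.not_eq_true] at hv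
      by_cases h : s = 0
      · have := ih t 1
        simp [List.foldl_cons, pvStepA, hv, h, this, pvScore_consonant ch _ hv]
      · have h2 : s * 2 ≠ 0 := by
          intro hc
          rcases mul_eq_zero.mp hc with h' | h' <;> omega
        have := ih t (s * 2)
        simp [List.foldl_cons, pvStepA, hv, h, h2, this, pow_succ]
        ring

-- pulling the accumulator out of a summing fold
theorem pvShift (g : String → Int) (rest : List String) : ∀ a : Int,
    rest.foldl (fun tot n => tot + g n) a = a + rest.foldl (fun tot n => tot + g n) 0 := by
  induction rest with
  | nil => intro a; simp
  | cons x xs ih =>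
    intro a
    simp only [List.foldl_cons]
    rw [ih, ih (0 + g x)]
    ring

-- outer fold: shift both accumulators out
theorem pvOuter (names : List String) : ∀ t : Int,
    names.foldl (fun t name =>
      let t := t + 5
      let p := (PySem.Str.lower name).toList.foldl pvStepA (t, 0)
      p.1 + p.2) t
    = t + 5 * (names.length : Int)
        + names.foldl (fun tot name => tot + pvScore (PySem.Str.lower name).toList) 0 := by
  induction names with
  | nil => intro t; simp
  | cons name rest ih =>
    intro t
    simp only [List.foldl_cons]
    rw [ih, pvInner]
    simp only [if_pos, List.length_cons]
    rw [pvShift (fun name => pvScore (PySem.Str.lower name).toList) rest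
        (0 + pvScore (PySem.Str.lower name).toList)]
    push_cast
    ring

-- ===== VERDICT (by name: the statement is the Claim_ definition above) =====
theorem takingAttendance_spec : Claim_equal_takingAttendance := by
  intro c _
  show takingAttendance c = takingAttendance_alt c
  unfold takingAttendance takingAttendance_alt
  rw [pvOuter]
  ring
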